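-- pv_equiv track=rewrite | github.com/ngosang/urbackup-exporter | urbackup-exporter.py | calc_client_backups
-- ===== SOURCE A (Python) =====
-- def calc_client_backups(client_backups):
--     count_archived = 0
--     size_archived = 0
--     size_no_archived = 0
--     for client_backup in client_backups:
--         if client_backup["archived"] == 1:
--             count_archived += 1
--             size_archived += client_backup["size_bytes"]
--         else:
--             size_no_archived += client_backup["size_bytes"]
--     count_no_archived = len(client_backups) - count_archived
--
--     return count_archived, count_no_archived, size_archived, size_no_archived
-- ===== SOURCE B (Python) =====
-- def calc_client_backups(client_backups):
--     arch = [b for b in client_backups if b["archived"] == 1]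
--     count_archived = len(arch)
--     count_no_archived = len(client_backups) - count_archived
--     size_archived = sum(b["size_bytes"] for b in arch)
--     size_no_archived = sum(b["size_bytes"] for b in client_backups if b["archived"] != 1)
--     return count_archived, count_no_archived, size_archived, size_no_archived
-- ===== Notes on version B (the rewrite author's own statement) =====
-- stated objective: alternative
-- what changed: Replaces the single branching accumulator loop by independent filter/len/sum passes (archived sublist first, then arithmetic and a non-archived sum).
import Mathlib
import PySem

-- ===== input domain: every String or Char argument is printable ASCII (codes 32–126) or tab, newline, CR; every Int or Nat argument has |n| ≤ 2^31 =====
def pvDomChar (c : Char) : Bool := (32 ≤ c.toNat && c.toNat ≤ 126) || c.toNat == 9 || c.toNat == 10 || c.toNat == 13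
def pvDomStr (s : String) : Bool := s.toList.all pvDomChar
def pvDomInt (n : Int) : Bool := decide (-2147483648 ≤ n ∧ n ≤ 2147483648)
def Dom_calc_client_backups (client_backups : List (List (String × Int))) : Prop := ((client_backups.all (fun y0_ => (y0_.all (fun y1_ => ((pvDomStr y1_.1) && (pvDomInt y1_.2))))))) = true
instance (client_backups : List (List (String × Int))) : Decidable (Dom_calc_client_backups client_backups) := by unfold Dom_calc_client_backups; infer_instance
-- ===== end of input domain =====

-- B replaces A's single branching accumulator loop by independent filter/length/sum passes; alternative decomposition, same cost.

-- shared dict lookup: first match in the association list (Pre_ guarantees the key exists, as Python raises KeyError otherwise)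
def pvGetD (b : List (String × Int)) (k : String) : Int := (b.lookup k).getD 0

-- ===== PORT A =====
def pvStepA (s : Int × Int × Int) (b : List (String × Int)) : Int × Int × Int :=
  if pvGetD b "archived" = 1 then (s.1 + 1, s.2.1 + pvGetD b "size_bytes", s.2.2)
  else (s.1, s.2.1, s.2.2 + pvGetD b "size_bytes")

def calc_client_backups (client_backups : List (List (String × Int))) : Int × Int × Int × Int :=
  let s := client_backups.foldl pvStepA (0, 0, 0)
  (s.1, (client_backups.length : Int) - s.1, s.2.1, s.2.2)

-- ===== PORT B =====
def calc_client_backups_alt (client_backups : List (List (String × Int))) : Int × Int × Int × Int :=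
  let arch := client_backups.filter (fun b => pvGetD b "archived" == 1)
  let count_archived : Int := arch.length
  let count_no_archived : Int := (client_backups.length : Int) - count_archived
  let size_archived := (arch.map (fun b => pvGetD b "size_bytes")).sum
  let size_no_archived :=
    ((client_backups.filter (fun b => pvGetD b "archived" != 1)).map
      (fun b => pvGetD b "size_bytes")).sum
  (count_archived, count_no_archived, size_archived, size_no_archived)

-- ===== PRECONDITION & SPEC =====
-- Pre_ excludes exactly the inputs where Python A raises KeyError: a backup dict missing "archived" or "size_bytes".
def Pre_calc_client_backups (client_backups : List (List (String × Int))) : Prop :=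
  (client_backups.all (fun b => (b.lookup "archived").isSome && (b.lookup "size_bytes").isSome)) = true
instance (client_backups : List (List (String × Int))) : Decidable (Pre_calc_client_backups client_backups) := by unfold Pre_calc_client_backups; infer_instance

def pvWitness_calc_client_backups : (List (List (String × Int))) :=
  [[("archived", 1), ("size_bytes", 100)], [("archived", 0), ("size_bytes", 7)]]

def Spec_calc_client_backups (client_backups : List (List (String × Int))) (out : Int × Int × Int × Int) : Prop := out = calc_client_backups_alt client_backups
instance (client_backups : List (List (String × Int))) (out : Int × Int × Int × Int) : Decidable (Spec_calc_client_backups client_backups out) := by unfold Spec_calc_client_backups; infer_instance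

-- ===== CLAIM (what is proved, stated in full; the proofs are below) =====
def Claim_equal_calc_client_backups : Prop := ∀ (client_backups : List (List (String × Int))), Dom_calc_client_backups client_backups → Pre_calc_client_backups client_backups → Spec_calc_client_backups client_backups (calc_client_backups client_backups)

-- ===== LEMMAS AND PROOFS =====
theorem foldl_pvStepA (cbs : List (List (String × Int))) (s : Int × Int × Int) :
    cbs.foldl pvStepA s =
      (s.1 + ((cbs.filter (fun b => pvGetD b "archived" == 1)).length : Int),
       s.2.1 + ((cbs.filter (fun b => pvGetD b "archived" == 1)).map (fun b => pvGetD b "size_bytes")).sum,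
       s.2.2 + ((cbs.filter (fun b => pvGetD b "archived" != 1)).map (fun b => pvGetD b "size_bytes")).sum) := by
  induction cbs generalizing s with
  | nil => simp
  | cons b rest ih =>
    simp only [List.foldl_cons, ih, List.filter_cons]
    by_cases h : pvGetD b "archived" = 1 <;>
      simp [pvStepA, h, Prod.ext_iff] <;> omega

-- ===== VERDICT (by name: the statement is the Claim_ definition above) =====
theorem calc_client_backups_spec : Claim_equal_calc_client_backups := by
  intro cbs _ _
  unfold Spec_calc_client_backups calc_client_backups calc_client_backups_alt
  simp only [foldl_pvStepA]
  simp
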